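-- pv_equiv track=rewrite | github.com/XuCai021130/NLP_Fundamental | hw0.py | case_sarcastically
-- ===== SOURCE A (Python) =====
-- def case_sarcastically(text: str) -> str:
--     res = ""
--     count = 0
--     for char in text:
--         if char.upper() == char.lower():
--             res += char
--         else:
--             count += 1
--             if count %2 == 1:
--                 res += char.lower()
--             else:
--                 res += char.upper()
--     return res
-- ===== SOURCE B (Python) =====
-- def case_sarcastically(text: str) -> str:
--     cased = [c for c in text if c.upper() != c.lower()]
--     transformed = [c.lower() if i % 2 == 0 else c.upper() for i, c in enumerate(cased)]
--     it = iter(transformed)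
--     return "".join(next(it) if c.upper() != c.lower() else c for c in text)
-- ===== Notes on version B (the rewrite author's own statement) =====
-- stated objective: alternative
-- what changed: Replaces A's single stateful loop with a running parity counter by a two-pass pipeline: collect the cased characters, transform them by their enumerate index parity, then re-merge them into the original text via an iterator.
import Mathlib
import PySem

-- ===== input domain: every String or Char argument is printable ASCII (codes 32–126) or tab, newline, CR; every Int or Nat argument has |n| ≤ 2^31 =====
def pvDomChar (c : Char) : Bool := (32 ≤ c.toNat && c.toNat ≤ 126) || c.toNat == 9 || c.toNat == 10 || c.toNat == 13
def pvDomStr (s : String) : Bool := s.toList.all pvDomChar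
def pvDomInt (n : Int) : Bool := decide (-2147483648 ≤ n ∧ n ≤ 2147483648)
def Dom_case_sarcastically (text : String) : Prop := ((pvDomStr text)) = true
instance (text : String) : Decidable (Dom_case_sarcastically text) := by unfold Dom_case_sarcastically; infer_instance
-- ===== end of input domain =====

-- B re-derives A's result by a two-pass pipeline (collect cased chars, transform by index
-- parity, merge back) instead of A's single stateful loop; objective: alternative.

-- ===== PORT A =====
-- A's for-loop over text with accumulator (res, count); res built char by char.
def pvGoA : List Char → List Char → Int → List Char
  | [], res, _ => res
  | c :: rest, res, count =>
    if PySem.Chars.upperChar c == PySem.Chars.lowerChar c then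
      pvGoA rest (res ++ [c]) count
    else
      let count := count + 1
      if count % 2 == 1 then pvGoA rest (res ++ [PySem.Chars.lowerChar c]) count
      else pvGoA rest (res ++ [PySem.Chars.upperChar c]) count

def case_sarcastically (text : String) : String :=
  String.mk (pvGoA text.toList [] 0)

-- ===== PORT B =====
-- B's merge pass: walk the text, consuming the next transformed char at each cased position.
def pvMerge : List Char → List Char → List Char
  | [], _ => []
  | c :: rest, ts =>
    if PySem.Chars.upperChar c == PySem.Chars.lowerChar c then
      c :: pvMerge rest ts
    else
      match ts with
      | [] => c :: pvMerge rest []   -- unreachable: ts holds one char per cased char of the text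
      | t :: ts' => t :: pvMerge rest ts'

def case_sarcastically_alt (text : String) : String :=
  let cased := text.toList.filter
    (fun c => !(PySem.Chars.upperChar c == PySem.Chars.lowerChar c))
  let transformed := (PySem.List.enumerate cased).map
    (fun p => if p.1 % 2 == 0 then PySem.Chars.lowerChar p.2 else PySem.Chars.upperChar p.2)
  String.mk (pvMerge text.toList transformed)

-- ===== PRECONDITION & SPEC =====
def Spec_case_sarcastically (text : String) (out : String) : Prop := out = case_sarcastically_alt text
instance (text : String) (out : String) : Decidable (Spec_case_sarcastically text out) := by unfold Spec_case_sarcastically; infer_instance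

-- ===== CLAIM (what is proved, stated in full; the proofs are below) =====
def Claim_equal_case_sarcastically : Prop := ∀ (text : String), Dom_case_sarcastically text → Spec_case_sarcastically text (case_sarcastically text)

-- ===== LEMMAS AND PROOFS =====

-- proof-only: the transformed list of the cased chars of l, starting at index k
def pvTr (k : Int) : List Char → List Char
  | [] => []
  | c :: cs =>
    (if k % 2 == 0 then PySem.Chars.lowerChar c else PySem.Chars.upperChar c) :: pvTr (k + 1) cs

theorem pvTr_eq_enumerate_map (cs : List Char) (k : Int) :
    (PySem.List.enumerate cs k).map
      (fun p => if p.1 % 2 == 0 then PySem.Chars.lowerChar p.2 else PySem.Chars.upperChar p.2)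
      = pvTr k cs := by
  induction cs generalizing k with
  | nil => simp only [PySem.List.enumerate_nil, List.map_nil, pvTr]
  | cons c cs ih => simp only [PySem.List.enumerate_cons, List.map_cons, pvTr, ih]

theorem pvGoA_eq_merge (l : List Char) (res : List Char) (k : Int) (hk : 0 ≤ k) :
    pvGoA l res k
      = res ++ pvMerge l
          (pvTr k (l.filter (fun c => !(PySem.Chars.upperChar c == PySem.Chars.lowerChar c)))) := by
  induction l generalizing res k with
  | nil => simp [pvGoA, pvMerge]
  | cons c rest ih =>
    by_cases h : PySem.Chars.upperChar c = PySem.Chars.lowerChar c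
    · have h' : (PySem.Chars.upperChar c == PySem.Chars.lowerChar c) = true := by simp [h]
      simp only [pvGoA, pvMerge, List.filter_cons, h', Bool.not_true, if_true, if_false,
        Bool.false_eq_true]
      rw [ih (res ++ [c]) k hk]
      simp
    · have h' : (PySem.Chars.upperChar c == PySem.Chars.lowerChar c) = false := by simp [h]
      have hpar : (((k + 1) % 2 == 1) = true) = ((k % 2 == 0) = true) := by
        simp only [beq_iff_eq, eq_iff_iff]
        omega
      simp only [pvGoA, pvMerge, List.filter_cons, h', Bool.not_false, if_true, if_false,
        Bool.false_eq_true, pvTr, hpar]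
      by_cases hk2 : (k % 2 == 0) = true
      · simp only [hk2, if_true]
        rw [ih (res ++ [PySem.Chars.lowerChar c]) (k + 1) (by omega)]
        simp
      · simp only [hk2, if_false, Bool.false_eq_true]
        rw [ih (res ++ [PySem.Chars.upperChar c]) (k + 1) (by omega)]
        simp

-- ===== VERDICT (by name: the statement is the Claim_ definition above) =====
theorem case_sarcastically_spec : Claim_equal_case_sarcastically := by
  intro text _
  show case_sarcastically text = case_sarcastically_alt text
  unfold case_sarcastically case_sarcastically_alt
  show String.mk (pvGoA text.toList [] 0) =
    String.mk (pvMerge text.toList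
      ((PySem.List.enumerate (text.toList.filter
          (fun c => !(PySem.Chars.upperChar c == PySem.Chars.lowerChar c)))).map
        (fun p => if p.1 % 2 == 0 then PySem.Chars.lowerChar p.2 else PySem.Chars.upperChar p.2)))
  rw [pvTr_eq_enumerate_map, pvGoA_eq_merge _ _ _ le_rfl]
  simp
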